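-- pv_equiv track=rewrite | github.com/lijianliu/atom-agentic-ai | agent/turn_logger.py | _sanitize_label
-- ===== SOURCE A (Python) =====
-- def _sanitize_label(text: str, max_len: int = 50) -> str:
--     """Sanitize text for use in filename.
--
--     - Only allows 0-9, a-z, A-Z
--     - Replaces other characters with '_'
--     - Collapses multiple underscores
--     - Strips leading/trailing underscores
--     - Truncates to max_len (default 50)
--     """
--     if not text:
--         return ""
--     result = []
--     for c in text:
--         if c.isalnum():
--             result.append(c)
--         else:
--             result.append("_")
--     sanitized = "".join(result)
--     # Collapse multiple underscores
--     while "__" in sanitized: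
--         sanitized = sanitized.replace("__", "_")
--     # Strip and truncate
--     return sanitized.strip("_")[:max_len]
-- ===== SOURCE B (Python) =====
-- def _sanitize_label(text: str, max_len: int = 50) -> str:
--     words = []
--     buf = []
--     for c in text:
--         if c.isalnum():
--             buf.append(c)
--         elif buf:
--             words.append("".join(buf))
--             buf = []
--     if buf:
--         words.append("".join(buf))
--     return "_".join(words)[:max_len]
-- ===== Notes on version B (the rewrite author's own statement) =====
-- stated objective: simpler
-- what changed: B tokenizes the text in one pass into maximal alphanumeric runs and joins them with single underscores before truncating, replacing A's per-character underscore mapping, repeated double-underscore collapse loop and underscore stripping.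
import Mathlib
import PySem

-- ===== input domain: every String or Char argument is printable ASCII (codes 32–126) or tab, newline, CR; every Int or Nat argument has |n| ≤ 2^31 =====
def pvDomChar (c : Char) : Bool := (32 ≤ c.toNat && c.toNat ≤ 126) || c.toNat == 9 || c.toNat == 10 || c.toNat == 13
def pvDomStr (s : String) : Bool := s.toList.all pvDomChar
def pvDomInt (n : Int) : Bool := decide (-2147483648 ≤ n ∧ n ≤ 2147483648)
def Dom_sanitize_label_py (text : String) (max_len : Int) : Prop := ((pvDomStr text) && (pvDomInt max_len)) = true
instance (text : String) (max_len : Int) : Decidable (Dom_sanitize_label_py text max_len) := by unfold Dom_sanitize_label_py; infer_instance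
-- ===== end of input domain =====

-- B replaces A's char-map + repeated double-underscore collapse loop + underscore stripping by
-- one pass that joins maximal alphanumeric runs with single underscores; same string on every input.


-- ===== PORT A =====
-- `rep` is a structural characterisation of `PySem.Chars.replace s "__" "_"`, used only to
-- justify termination of the while-loop port (each pass strictly shortens the string).
def repUnd : List Char → List Char
  | [] => []
  | '_' :: '_' :: t => '_' :: repUnd t
  | c :: t => c :: repUnd t

theorem repUnd_length_le (l : List Char) : (repUnd l).length ≤ l.length := by
  fun_induction repUnd l <;> simp_all <;> omega

theorem replace_go_eq_repUnd (fuel : Nat) (l acc : List Char) (h : l.length ≤ fuel) :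
    PySem.Chars.replace.go ['_', '_'] ['_'] fuel l acc = acc.reverse ++ repUnd l := by
  induction fuel generalizing l acc with
  | zero =>
    rw [List.length_eq_zero_iff.mp (Nat.le_zero.mp h)]
    simp [PySem.Chars.replace.go, repUnd]
  | succ n ih =>
    match l with
    | [] => simp [PySem.Chars.replace.go, repUnd]
    | c :: t =>
      simp only [PySem.Chars.replace.go]
      by_cases hp : List.isPrefixOf ['_', '_'] (c :: t)
      · rw [List.isPrefixOf_iff_prefix] at hp
        obtain ⟨u, hu⟩ := hp
        injection hu with h1 h2
        subst h1; subst h2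
        simp only [List.isPrefixOf_iff_prefix]
        rw [if_pos ⟨u, rfl⟩]
        rw [ih _ _ (by simp at h ⊢; omega)]
        simp [repUnd]
      · rw [if_neg (by rw [List.isPrefixOf_iff_prefix]; rw [List.isPrefixOf_iff_prefix] at hp; exact hp)]
        rw [ih _ _ (by simp at h ⊢; omega)]
        have hc : ¬ (c = '_' ∧ ∃ u, t = '_' :: u) := by
          rintro ⟨rfl, u, rfl⟩; exact hp (by rw [List.isPrefixOf_iff_prefix]; exact ⟨u, rfl⟩)
        match c, t with
        | c, [] => simp [repUnd]
        | c, d :: t =>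
          by_cases h1 : c = '_' <;> by_cases h2 : d = '_' <;>
            simp_all [repUnd] <;> simp [repUnd, h1, h2]

theorem replace_eq_repUnd (s : List Char) :
    PySem.Chars.replace s ['_', '_'] ['_'] = repUnd s := by
  simpa using replace_go_eq_repUnd s.length s []

theorem repUnd_length_lt (s : List Char) (h : ['_', '_'] <:+: s) :
    (repUnd s).length < s.length := by
  induction s with
  | nil => simp at h
  | cons c t ih =>
    rcases List.infix_cons_iff.mp h with hpre | hinf
    · obtain ⟨u, hu⟩ := hpre
      injection hu with h1 h2
      subst h1; subst h2
      change (repUnd ('_' :: '_' :: u)).length < ('_' :: '_' :: u).length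
      have e : repUnd ('_' :: '_' :: u) = '_' :: repUnd u := rfl
      rw [e]
      have := repUnd_length_le u
      simp; omega
    · have := ih hinf
      match c, t with
      | '_', '_' :: u =>
        simp only [repUnd]
        have := repUnd_length_le u
        simp at this ⊢; omega
      | c, t =>
        by_cases h1 : c = '_'
        · match t, hinf with
          | [], hinf => simp at hinf
          | d :: t, hinf =>
            by_cases h2 : d = '_'
            · subst h1 h2
              simp only [repUnd]
              have := repUnd_length_le t
              simp; omega
            · subst h1
              have : repUnd ('_' :: d :: t) = '_' :: repUnd (d :: t) := by
                cases d <;> simp_all [repUnd]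
              rw [this]; simpa using ih hinf
        · have : repUnd (c :: t) = c :: repUnd t := by
            match t with
            | [] => simp [repUnd]
            | d :: t => cases c <;> cases d <;> simp_all [repUnd]
          rw [this]; simpa using ih hinf

theorem replace_length_lt (s : List Char) (h : PySem.Chars.isIn ['_', '_'] s = true) :
    (PySem.Chars.replace s ['_', '_'] ['_']).length < s.length := by
  rw [replace_eq_repUnd]
  exact repUnd_length_lt s ((PySem.Chars.isIn_iff_infix _ _).mp h)

-- the 'while "__" in sanitized: sanitized = sanitized.replace("__", "_")' loop
def collapseLoop (s : List Char) : List Char :=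
  if h : PySem.Chars.isIn ['_', '_'] s = true then
    collapseLoop (PySem.Chars.replace s ['_', '_'] ['_'])
  else s
termination_by s.length
decreasing_by exact replace_length_lt s h

def sanitize_label_py (text : String) (max_len : Int) : String :=
  if text.toList.isEmpty then "" else
  let result : List Char :=
    text.toList.foldl (fun acc c => acc ++ [if PySem.Chars.isalnum c then c else '_']) []
  let sanitized := collapseLoop result
  String.ofList (PySem.Chars.slice (PySem.Chars.stripChars sanitized ['_']) none (some max_len))

-- ===== PORT B =====
def sanitize_label_py_alt (text : String) (max_len : Int) : String :=
  let st : List (List Char) × List Char :=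
    text.toList.foldl (fun st c =>
      if PySem.Chars.isalnum c then (st.1, st.2 ++ [c])
      else if st.2 ≠ [] then (st.1 ++ [st.2], [])
      else st) ([], [])
  let words := if st.2 ≠ [] then st.1 ++ [st.2] else st.1
  String.ofList (PySem.Chars.slice (PySem.Chars.join ['_'] words) none (some max_len))

-- ===== PRECONDITION & SPEC =====
def Spec_sanitize_label_py (text : String) (max_len : Int) (out : String) : Prop := out = sanitize_label_py_alt text max_len
instance (text : String) (max_len : Int) (out : String) : Decidable (Spec_sanitize_label_py text max_len out) := by unfold Spec_sanitize_label_py; infer_instance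

-- ===== CLAIM (what is proved, stated in full; the proofs are below) =====
def Claim_equal_sanitize_label_py : Prop := ∀ (text : String) (max_len : Int), Dom_sanitize_label_py text max_len → Spec_sanitize_label_py text max_len (sanitize_label_py text max_len)

-- ===== LEMMAS AND PROOFS =====

-- squeeze: collapse every run of underscores to a single underscore
def squeeze : List Char → List Char
  | [] => []
  | [c] => [c]
  | a :: b :: rest =>
    if a = '_' ∧ b = '_' then squeeze (b :: rest) else a :: squeeze (b :: rest)

-- tokens of the text: maximal alphanumeric runs, with a pending buffer
def tokAux (buf : List Char) : List Char → List (List Char)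
  | [] => if buf ≠ [] then [buf] else []
  | c :: t =>
    if PySem.Chars.isalnum c then tokAux (buf ++ [c]) t
    else (if buf ≠ [] then [buf] else []) ++ tokAux [] t

def fChar (c : Char) : Char := if PySem.Chars.isalnum c then c else '_'

def J (t : List Char) : List Char := PySem.Chars.join ['_'] (tokAux [] t)


def R : List Char → List Char
  | [] => []
  | c :: t =>
    if PySem.Chars.isalnum c then c :: R t
    else if t.any PySem.Chars.isalnum then '_' :: J t else []

theorem isalnum_und : PySem.Chars.isalnum '_' = false := by decide

theorem ne_und_of_isalnum {c : Char} (h : PySem.Chars.isalnum c = true) : c ≠ '_' := by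
  rintro rfl; rw [isalnum_und] at h; cases h

-- squeeze unfolding lemmas
theorem squeeze_cons_ne (c : Char) (x : List Char) (hc : c ≠ '_') :
    squeeze (c :: x) = c :: squeeze x := by
  match x with
  | [] => simp [squeeze]
  | b :: r => simp [squeeze, hc]

theorem squeeze_und_und (r : List Char) : squeeze ('_' :: '_' :: r) = squeeze ('_' :: r) := by
  simp [squeeze]

theorem squeeze_und_cons_ne (b : Char) (r : List Char) (hb : b ≠ '_') :
    squeeze ('_' :: b :: r) = '_' :: squeeze (b :: r) := by
  simp [squeeze, hb]

theorem squeeze_und_congr (x y : List Char) (hh : x.head? = y.head?) (hs : squeeze x = squeeze y) :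
    squeeze ('_' :: x) = squeeze ('_' :: y) := by
  match x, y with
  | [], [] => rfl
  | [], b :: y' => simp at hh
  | a :: x', [] => simp at hh
  | a :: x', b :: y' =>
    have hab : a = b := by simpa using hh
    subst hab
    by_cases ha : a = '_'
    · subst ha; rw [squeeze_und_und, squeeze_und_und]; exact hs
    · rw [squeeze_und_cons_ne _ _ ha, squeeze_und_cons_ne _ _ ha, hs]

theorem repUnd_head? (t : List Char) : (repUnd t).head? = t.head? := by
  fun_induction repUnd t <;> rfl

theorem squeeze_repUnd (s : List Char) : squeeze (repUnd s) = squeeze s := by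
  fun_induction repUnd s with
  | case1 => rfl
  | case2 t ih =>
    rw [squeeze_und_und]
    exact squeeze_und_congr _ _ (repUnd_head? t) ih
  | case3 c t h ih =>
    by_cases hc : c = '_'
    · subst hc; exact squeeze_und_congr _ _ (repUnd_head? t) ih
    · rw [squeeze_cons_ne _ _ hc, squeeze_cons_ne _ _ hc, ih]

theorem squeeze_of_no_infix (s : List Char) (h : ¬ ['_', '_'] <:+: s) : squeeze s = s := by
  induction s with
  | nil => rfl
  | cons a t ih =>
    match t with
    | [] => rfl
    | b :: r =>
      have hnb : ¬ ['_', '_'] <:+: b :: r := by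
        rintro ⟨s1, s2, he⟩; exact h ⟨a :: s1, s2, by rw [← he]; rfl⟩
      have hab : ¬ (a = '_' ∧ b = '_') := by
        rintro ⟨rfl, rfl⟩; exact h ⟨[], r, rfl⟩
      simp only [squeeze]
      rw [if_neg hab, ih hnb]

theorem collapseLoop_eq_squeeze (s : List Char) : collapseLoop s = squeeze s := by
  fun_induction collapseLoop s with
  | case1 s h ih =>
    rw [ih, replace_eq_repUnd, squeeze_repUnd]
  | case2 s h =>
    have h' : PySem.Chars.isIn ['_', '_'] s = false := by simpa using h
    exact (squeeze_of_no_infix s ((PySem.Chars.isIn_eq_false_iff _ _).mp h')).symm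

-- the strip predicate and right strip
def puB (c : Char) : Bool := ['_'].contains c

def rstripU (y : List Char) : List Char := (List.dropWhile puB y.reverse).reverse

theorem stripChars_eq (s : List Char) :
    PySem.Chars.stripChars s ['_'] = rstripU (List.dropWhile puB s) := rfl

theorem puB_eq_false {c : Char} (hc : c ≠ '_') : puB c = false := by
  simp [puB, hc]

theorem rstripU_nil : rstripU [] = [] := rfl

theorem rstripU_cons_ne (c : Char) (y : List Char) (hc : puB c = false) :
    rstripU (c :: y) = c :: rstripU y := by
  unfold rstripU
  rw [List.reverse_cons, List.dropWhile_append]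
  by_cases he : (List.dropWhile puB y.reverse).isEmpty
  · rw [List.isEmpty_iff] at he
    simp [List.dropWhile, hc, he]
  · simp [he]

theorem rstripU_und_cons (y : List Char) (h : rstripU y ≠ []) :
    rstripU ('_' :: y) = '_' :: rstripU y := by
  unfold rstripU at *
  rw [List.reverse_cons, List.dropWhile_append]
  have he : (List.dropWhile puB y.reverse).isEmpty = false := by
    rw [List.isEmpty_eq_false_iff]
    intro hx; exact h (by rw [hx]; rfl)
  simp [he]

theorem rstripU_und_cons_empty (y : List Char) (h : rstripU y = []) :
    rstripU ('_' :: y) = [] := by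
  unfold rstripU at *
  rw [List.reverse_cons, List.dropWhile_append]
  have he : (List.dropWhile puB y.reverse).isEmpty = true := by
    rw [List.isEmpty_iff]
    have := congrArg List.reverse h
    simpa using this
  simp [he, List.dropWhile, puB]

-- tokAux facts
theorem tokAux_ne_nil (t : List Char) : ∀ buf, buf ≠ [] → tokAux buf t ≠ [] := by
  induction t with
  | nil => intro buf hb; simp [tokAux, hb]
  | cons c t ih =>
    intro buf hb
    simp only [tokAux]
    split
    · exact ih _ (by simp)
    · simp [hb]

theorem tokAux_nil_eq_nil_iff (t : List Char) :
    tokAux [] t = [] ↔ t.any PySem.Chars.isalnum = false := by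
  induction t with
  | nil => simp [tokAux]
  | cons c t ih =>
    simp only [tokAux, List.any_cons]
    by_cases hc : PySem.Chars.isalnum c = true
    · simp [hc, tokAux_ne_nil t [c] (by simp)]
    · have hc' : PySem.Chars.isalnum c = false := by simpa using hc
      simp [hc', ih]

theorem join_tokAux (t : List Char) : ∀ buf, buf ≠ [] →
    PySem.Chars.join ['_'] (tokAux buf t) = buf ++ R t := by
  induction t with
  | nil =>
    intro buf hb
    simp [tokAux, hb, PySem.Chars.join_singleton, R]
  | cons c t ih =>
    intro buf hb
    simp only [tokAux, R]
    by_cases hc : PySem.Chars.isalnum c = true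
    · rw [if_pos hc, if_pos hc, ih _ (by simp)]
      simp
    · have hc' : PySem.Chars.isalnum c = false := by simpa using hc
      rw [if_neg (show ¬ PySem.Chars.isalnum c = true by simp [hc']),
          if_neg (show ¬ PySem.Chars.isalnum c = true by simp [hc']), if_pos hb]
      by_cases ha : t.any PySem.Chars.isalnum = true
      · have hne : tokAux [] t ≠ [] := by
          rw [Ne, tokAux_nil_eq_nil_iff]; simp [ha]
        match htk : tokAux [] t, hne with
        | q :: rest, _ =>
          rw [if_pos ha]
          have : J t = PySem.Chars.join ['_'] (q :: rest) := by rw [J, htk]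
          rw [List.singleton_append, PySem.Chars.join_cons_cons, ← this]
          simp
      · have ha' : t.any PySem.Chars.isalnum = false := by simpa using ha
        rw [(tokAux_nil_eq_nil_iff t).mpr ha', if_neg (by simp [ha'])]
        simp [PySem.Chars.join_singleton]

theorem J_nil : J [] = [] := rfl

theorem J_alnum (c : Char) (t : List Char) (hc : PySem.Chars.isalnum c = true) :
    J (c :: t) = c :: R t := by
  rw [J]
  simp only [tokAux, hc, if_true, List.nil_append]
  rw [join_tokAux t [c] (by simp)]
  rfl

theorem J_nonalnum (c : Char) (t : List Char) (hc : PySem.Chars.isalnum c = false) :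
    J (c :: t) = J t := by
  rw [J, J]
  simp [tokAux, hc]

-- B's fold computes the token list
def wordsOf (st : List (List Char) × List Char) : List (List Char) :=
  if st.2 ≠ [] then st.1 ++ [st.2] else st.1

theorem foldl_tokAux (t : List Char) : ∀ ws buf,
    wordsOf (t.foldl (fun st c =>
      if PySem.Chars.isalnum c then (st.1, st.2 ++ [c])
      else if st.2 ≠ [] then (st.1 ++ [st.2], [])
      else st) (ws, buf)) = ws ++ tokAux buf t := by
  induction t with
  | nil =>
    intro ws buf
    by_cases hb : buf = [] <;> simp [wordsOf, tokAux, hb]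
  | cons c t ih =>
    intro ws buf
    rw [List.foldl_cons]
    by_cases hc : PySem.Chars.isalnum c = true
    · simp only [tokAux, hc, if_true]
      exact ih ws (buf ++ [c])
    · have hc' : PySem.Chars.isalnum c = false := by simpa using hc
      by_cases hb : buf = []
      · subst hb
        simp only [tokAux, hc', Bool.false_eq_true, if_false, ne_eq, not_true_eq_false,
                   List.nil_append]
        simpa using ih ws []
      · simp only [tokAux, hc', Bool.false_eq_true, if_false, ne_eq, hb, not_false_eq_true,
                   if_true]
        rw [ih (ws ++ [buf]) []]
        simp

-- the central identities
theorem core1 (t : List Char) : rstripU (squeeze (t.map fChar)) = R t := by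
  induction t with
  | nil => rfl
  | cons c t ih =>
    by_cases hc : PySem.Chars.isalnum c = true
    · have hne := ne_und_of_isalnum hc
      have hf : fChar c = c := by rw [fChar, if_pos hc]
      rw [List.map_cons, hf, squeeze_cons_ne _ _ hne, rstripU_cons_ne _ _ (puB_eq_false hne), ih]
      rw [R]
      rw [if_pos hc]
    · have hc' : PySem.Chars.isalnum c = false := by simpa using hc
      have hf : fChar c = '_' := by rw [fChar, if_neg hc]
      rw [List.map_cons, hf]
      match t with
      | [] =>
        rw [R]
        rw [if_neg hc, if_neg (by simp)]
        exact rstripU_und_cons_empty [] rstripU_nil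
      | d :: t' =>
        by_cases hd : PySem.Chars.isalnum d = true
        · have hdne := ne_und_of_isalnum hd
          have hfd : fChar d = d := by rw [fChar, if_pos hd]
          have hsq : squeeze ('_' :: (d :: t').map fChar) = '_' :: squeeze ((d :: t').map fChar) := by
            rw [List.map_cons, hfd]
            exact squeeze_und_cons_ne _ _ hdne
          have hRne : R (d :: t') ≠ [] := by
            rw [R, if_pos hd]; simp
          have hR : R (c :: d :: t') = '_' :: J (d :: t') := by
            rw [R, if_neg hc, if_pos (by simp [hd])]
          rw [hsq, rstripU_und_cons _ (by rw [ih]; exact hRne), ih, hR, J_alnum d t' hd,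
              R, if_pos hd]
        · have hd' : PySem.Chars.isalnum d = false := by simpa using hd
          have hfd : fChar d = '_' := by rw [fChar, if_neg hd]
          have hsq : squeeze ('_' :: (d :: t').map fChar) = squeeze ((d :: t').map fChar) := by
            rw [List.map_cons, hfd]
            exact squeeze_und_und _
          rw [hsq, ih]
          rw [R, R]
          rw [if_neg hc, if_neg hd, J_nonalnum d t' hd']
          simp [hd']

theorem central (cs : List Char) :
    PySem.Chars.stripChars (squeeze (cs.map fChar)) ['_'] = J cs := by
  induction cs with
  | nil => rfl
  | cons c t ih =>
    rw [stripChars_eq]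
    by_cases hc : PySem.Chars.isalnum c = true
    · have hne := ne_und_of_isalnum hc
      have hf : fChar c = c := by rw [fChar, if_pos hc]
      have hdw : List.dropWhile puB (squeeze ((c :: t).map fChar))
          = squeeze ((c :: t).map fChar) := by
        rw [List.map_cons, hf, squeeze_cons_ne _ _ hne]
        exact List.dropWhile_cons_of_neg (by simp [puB_eq_false hne])
      rw [hdw, core1 (c :: t), J_alnum c t hc, R, if_pos hc]
    · have hc' : PySem.Chars.isalnum c = false := by simpa using hc
      have hf : fChar c = '_' := by rw [fChar, if_neg hc]
      rw [List.map_cons, hf, J_nonalnum c t hc']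
      match t with
      | [] =>
        show rstripU (List.dropWhile puB ['_']) = J []
        rw [J_nil]
        simp [List.dropWhile, puB, rstripU_nil]
      | d :: t' =>
        by_cases hd : PySem.Chars.isalnum d = true
        · have hdne := ne_und_of_isalnum hd
          have hfd : fChar d = d := by rw [fChar, if_pos hd]
          have hsq : squeeze ('_' :: (d :: t').map fChar) = '_' :: squeeze ((d :: t').map fChar) := by
            rw [List.map_cons, hfd]
            exact squeeze_und_cons_ne _ _ hdne
          have hsq2 : squeeze ((d :: t').map fChar) = d :: squeeze (t'.map fChar) := by
            rw [List.map_cons, hfd]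
            exact squeeze_cons_ne _ _ hdne
          have hdw : List.dropWhile puB (squeeze ('_' :: (d :: t').map fChar))
              = squeeze ((d :: t').map fChar) := by
            rw [hsq, List.dropWhile_cons_of_pos (by simp [puB]), hsq2,
                List.dropWhile_cons_of_neg (by simp [puB_eq_false hdne]), ← hsq2]
          rw [hdw, core1 (d :: t'), J_alnum d t' hd, R, if_pos hd]
        · have hd' : PySem.Chars.isalnum d = false := by simpa using hd
          have hfd : fChar d = '_' := by rw [fChar, if_neg hd]
          have hsq : squeeze ('_' :: (d :: t').map fChar) = squeeze ((d :: t').map fChar) := by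
            rw [List.map_cons, hfd]
            exact squeeze_und_und _
          rw [hsq, ← stripChars_eq, ih]

-- ===== VERDICT (by name: the statement is the Claim_ definition above) =====
theorem sanitize_label_py_spec : Claim_equal_sanitize_label_py := by
  intro text max_len _
  unfold Spec_sanitize_label_py sanitize_label_py sanitize_label_py_alt
  by_cases he : text.toList.isEmpty
  · have h0 : text.toList = [] := by simpa using he
    rw [if_pos he, h0]
    simp [PySem.Chars.join_nil, PySem.Chars.slice_eq_listSlice, PySem.List.slice]
  · rw [if_neg he]
    have hA : text.toList.foldl (fun acc c => acc ++ [if PySem.Chars.isalnum c then c else '_']) [] =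
        text.toList.map fChar := by
      rw [PySem.List.foldl_append_singleton_eq_map (fun c => if PySem.Chars.isalnum c then c else '_') text.toList []]
      rfl
    have hB : (if (text.toList.foldl (fun st c =>
          if PySem.Chars.isalnum c then (st.1, st.2 ++ [c])
          else if st.2 ≠ [] then (st.1 ++ [st.2], [])
          else st) (([] : List (List Char)), ([] : List Char))).2 ≠ [] then
          (text.toList.foldl (fun st c =>
          if PySem.Chars.isalnum c then (st.1, st.2 ++ [c])
          else if st.2 ≠ [] then (st.1 ++ [st.2], [])
          else st) (([] : List (List Char)), ([] : List Char))).1 ++ [(text.toList.foldl (fun st c =>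
          if PySem.Chars.isalnum c then (st.1, st.2 ++ [c])
          else if st.2 ≠ [] then (st.1 ++ [st.2], [])
          else st) (([] : List (List Char)), ([] : List Char))).2] else
          (text.toList.foldl (fun st c =>
          if PySem.Chars.isalnum c then (st.1, st.2 ++ [c])
          else if st.2 ≠ [] then (st.1 ++ [st.2], [])
          else st) (([] : List (List Char)), ([] : List Char))).1) = tokAux [] text.toList := by
      have := foldl_tokAux text.toList [] []
      rw [wordsOf] at this
      simpa using this
    simp only [hA, hB, collapseLoop_eq_squeeze, central]
    rfl
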